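-- pv_equiv track=rewrite | github.com/vitaliuchik/ProgrammingBasics1-Python | lab08-collections/materials/song_words_gen.py | bigrams_gen
-- ===== SOURCE A (Python) =====
-- def bigrams_gen(sents):
--     """
--     Return bigrams from sents
--     """
--
--     n = 2
--     bigrams_list = []
--     for sent in sents:
--         sent = [s for s in sent.split() if sent.split() and s.isalpha()]
--         sent_bigrams = [sent[i:i+n] for i in range(len(sent)-n+1)]
--         bigrams_list.extend(sent_bigrams)
--     return [tuple(bigram) for bigram in bigrams_list]
-- ===== SOURCE B (Python) =====
-- def bigrams_gen(sents):
--     """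
--     Return bigrams from sents
--     """
--     res = []
--     for sent in sents:
--         prev = None
--         for w in sent.split():
--             if not w.isalpha():
--                 continue
--             if prev is not None:
--                 res.append((prev, w))
--             prev = w
--     return res
-- ===== Notes on version B (the rewrite author's own statement) =====
-- stated objective: simpler
-- what changed: One forward pass per sentence with a running 'prev' word emitting pairs directly, instead of building a filtered word list (with sent.split() re-evaluated per word in the filter condition), a windowed list-of-slices per sentence, and a final tuple-conversion pass.
import Mathlib
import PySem

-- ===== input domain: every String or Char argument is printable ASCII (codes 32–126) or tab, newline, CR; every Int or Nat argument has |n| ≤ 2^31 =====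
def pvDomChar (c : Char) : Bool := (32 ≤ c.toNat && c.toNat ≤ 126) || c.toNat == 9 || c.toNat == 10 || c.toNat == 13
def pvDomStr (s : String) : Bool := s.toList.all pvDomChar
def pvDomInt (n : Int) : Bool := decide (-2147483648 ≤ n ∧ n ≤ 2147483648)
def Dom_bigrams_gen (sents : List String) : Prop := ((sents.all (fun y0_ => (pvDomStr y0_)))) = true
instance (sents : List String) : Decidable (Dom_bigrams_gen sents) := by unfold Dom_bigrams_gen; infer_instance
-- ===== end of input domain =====

-- B is a single forward pass per sentence carrying the previous alphabetic word and emitting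
-- each pair directly, instead of A's filtered word list + windowed slice comprehension + tuple pass.

-- ===== PORT A =====
-- sent = [s for s in sent.split() if sent.split() and s.isalpha()]
-- sent_bigrams = [sent[i:i+n] for i in range(len(sent)-n+1)]  (n = 2)
def bigrams_gen (sents : List String) : List (List String) :=
  let bigrams_list := sents.foldl (fun bl sent =>
    let sentW := (PySem.Str.split₀ sent).filter
      (fun s => !(PySem.Str.split₀ sent).isEmpty && PySem.Str.strIsalpha s)
    let sent_bigrams := (PySem.List.pyRange 0 ((sentW.length : Int) - 2 + 1) 1).map
      (fun i => PySem.List.slice sentW (some i) (some (i + 2)))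
    bl ++ sent_bigrams) []
  bigrams_list.map (fun bigram => bigram)

-- ===== PORT B =====
-- inner-loop body: skip non-alphabetic words; if a previous word is held, emit the pair
def altStep (st : Option String × List (List String)) (w : String) :
    Option String × List (List String) :=
  if !PySem.Str.strIsalpha w then st
  else
    match st.1 with
    | some p => (some w, st.2 ++ [[p, w]])
    | none   => (some w, st.2)

def bigrams_gen_alt (sents : List String) : List (List String) :=
  sents.foldl (fun res sent => ((PySem.Str.split₀ sent).foldl altStep (none, res)).2) []

-- ===== PRECONDITION & SPEC =====
def Spec_bigrams_gen (sents : List String) (out : List (List String)) : Prop := out = bigrams_gen_alt sents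
instance (sents : List String) (out : List (List String)) : Decidable (Spec_bigrams_gen sents out) := by unfold Spec_bigrams_gen; infer_instance

-- ===== CLAIM (what is proved, stated in full; the proofs are below) =====
def Claim_equal_bigrams_gen : Prop := ∀ (sents : List String), Dom_bigrams_gen sents → Spec_bigrams_gen sents (bigrams_gen sents)

-- ===== LEMMAS AND PROOFS =====

-- adjacent pairs of ws, with p held as the previous word
def pairsFrom (p : String) : List String → List (List String)
  | [] => []
  | w :: t => [p, w] :: pairsFrom w t

def pairs : List String → List (List String)
  | [] => []
  | w :: t => pairsFrom w t

-- skipping non-alphabetic words in the loop = looping over the filtered list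
theorem foldl_altStep_filter (ws : List String) (st : Option String × List (List String)) :
    ws.foldl altStep st
      = (ws.filter (fun s => PySem.Str.strIsalpha s)).foldl altStep st := by
  induction ws generalizing st with
  | nil => rfl
  | cons w t ih =>
      by_cases h : PySem.Chars.strIsalpha w.toList = true
      · simp [List.filter, h, List.foldl_cons, ih]
      · simp only [Bool.not_eq_true] at h
        simp [List.filter, h, List.foldl_cons, altStep, ih]

theorem foldl_altStep_pairsFrom (ws : List String) (h : ∀ w ∈ ws, PySem.Str.strIsalpha w = true) :
    ∀ (p : String) (res : List (List String)),
      (ws.foldl altStep (some p, res)).2 = res ++ pairsFrom p ws := by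
  induction ws with
  | nil => intro p res; simp [pairsFrom]
  | cons w t ih =>
      intro p res
      have hw : PySem.Chars.strIsalpha w.toList = true := by
        have := h w (List.mem_cons_self ..); simpa [PySem.Str.strIsalpha] using this
      have ht : ∀ x ∈ t, PySem.Str.strIsalpha x = true := fun x hx => h x (List.mem_cons_of_mem _ hx)
      simp [List.foldl_cons, altStep, hw, ih ht, pairsFrom]

theorem foldl_altStep_pairs (ws : List String) (h : ∀ w ∈ ws, PySem.Str.strIsalpha w = true)
    (res : List (List String)) :
    (ws.foldl altStep (none, res)).2 = res ++ pairs ws := by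
  cases ws with
  | nil => simp [pairs]
  | cons w t =>
      have hw : PySem.Chars.strIsalpha w.toList = true := by
        have := h w (List.mem_cons_self ..); simpa [PySem.Str.strIsalpha] using this
      have ht : ∀ x ∈ t, PySem.Str.strIsalpha x = true := fun x hx => h x (List.mem_cons_of_mem _ hx)
      simp [List.foldl_cons, altStep, hw, foldl_altStep_pairsFrom t ht, pairs]

-- A's windowed slices over a word list are exactly its adjacent pairs
theorem range_take_two_eq_pairs (ws : List String) :
    (List.range (ws.length - 1)).map (fun k => (ws.drop k).take 2) = pairs ws := by
  induction ws with
  | nil => rfl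
  | cons x t ih =>
      cases t with
      | nil => rfl
      | cons y u =>
          have : (x :: y :: u : List String).length - 1 = (y :: u).length - 1 + 1 := by
            simp
          rw [this, List.range_succ_eq_map, List.map_cons, List.map_map]
          simp only [Function.comp_def, List.drop_succ_cons, List.drop_zero]
          rw [ih]
          simp [pairs, pairsFrom]

theorem slices_eq_pairs (ws : List String) :
    (PySem.List.pyRange 0 ((ws.length : Int) - 2 + 1) 1).map
      (fun i => PySem.List.slice ws (some i) (some (i + 2))) = pairs ws := by
  have h1 : ((ws.length : Int) - 2 + 1) = (ws.length : Int) - 1 := by ring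
  rw [h1, PySem.List.pyRange_one, List.map_map]
  have h2 : ((ws.length : Int) - 1 - 0).toNat = ws.length - 1 := by omega
  rw [h2]
  simp only [Function.comp_def, zero_add]
  have h3 : ∀ k ∈ List.range (ws.length - 1),
      PySem.List.slice ws (some (k : Int)) (some ((k : Int) + 2)) = (ws.drop k).take 2 := by
    intro k _
    rw [PySem.List.slice_toNat ws (a := (k : Int)) (b := (k : Int) + 2) (by omega) (by omega)]
    congr 1
    omega
  rw [List.map_congr_left h3, range_take_two_eq_pairs]

-- the sentence-emptiness guard in A's filter is redundant
theorem filter_guard_eq (ws : List String) :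
    ws.filter (fun s => !ws.isEmpty && PySem.Str.strIsalpha s)
      = ws.filter (fun s => PySem.Str.strIsalpha s) := by
  cases ws with
  | nil => rfl
  | cons w t => simp

theorem per_sentence (sent : String) (res : List (List String)) :
    ((PySem.Str.split₀ sent).foldl altStep (none, res)).2
      = res ++ (PySem.List.pyRange 0
          ((((PySem.Str.split₀ sent).filter
              (fun s => !(PySem.Str.split₀ sent).isEmpty && PySem.Str.strIsalpha s)).length : Int) - 2 + 1) 1).map
          (fun i => PySem.List.slice
            ((PySem.Str.split₀ sent).filter
              (fun s => !(PySem.Str.split₀ sent).isEmpty && PySem.Str.strIsalpha s))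
            (some i) (some (i + 2))) := by
  rw [filter_guard_eq, slices_eq_pairs]
  rw [foldl_altStep_filter]
  exact foldl_altStep_pairs _ (fun w hw => (List.mem_filter.mp hw).2) res

-- ===== VERDICT (by name: the statement is the Claim_ definition above) =====
theorem bigrams_gen_spec : Claim_equal_bigrams_gen := by
  intro sents hd
  clear hd
  unfold Spec_bigrams_gen bigrams_gen bigrams_gen_alt
  simp only [List.map_id_fun', id]
  induction sents using List.reverseRecOn with
  | nil => rfl
  | append_singleton t sent ih =>
      rw [List.foldl_append, List.foldl_append, List.foldl_cons, List.foldl_nil,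
        List.foldl_cons, List.foldl_nil, ih, per_sentence]
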